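-- pv_equiv track=rewrite | github.com/2x2ChurchAccountability/locations | process_locations.py | adjust_state_and_state
-- ===== SOURCE A (Python) =====
-- from typing import Optional, Tuple, Dict, List
--
-- def adjust_state_and_state(line: str, countries: Dict) -> Optional[Dict]:
--     """Handle photo patterns by ignoring them."""
--     # Look for patterns like "state1 and state2"
--     for country, info in countries.items():
--         for state1 in info.get('states', []):
--             for state2 in info.get('states', []):
--                 if state1 != state2:  # Avoid matching same state
--                     pattern = f"{state1} and {state2}"
--                     if pattern in line:
--                         # Found a valid combination, replace it
--                         new_line = line.replace(pattern, f"{state1}/{state2}")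
--                         return {'line': new_line}
--
--     # If no valid combination found, return original line
--     return {'line': line}
-- ===== SOURCE B (Python) =====
-- def adjust_state_and_state(line, countries):
--     """Handle photo patterns by ignoring them."""
--     SEP = " and "
--     # one scan of the line: positions where " and " occurs
--     occs = [i for i in range(len(line)) if line[i:i+5] == SEP]
--     # flat candidate list in A's priority order, built once
--     pairs = [(s1, s2)
--              for info in countries.values()
--              for s1 in info.get('states', [])
--              for s2 in info.get('states', [])
--              if s1 != s2]
--     hit = next((p for p in pairs
--                 if any(line[:i].endswith(p[0]) and line[i+5:].startswith(p[1])
--                        for i in occs)),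
--                None)
--     if hit is None:
--         return {'line': line}
--     s1, s2 = hit
--     return {'line': line.replace(s1 + SEP + s2, s1 + "/" + s2)}
-- ===== Notes on version B (the rewrite author's own statement) =====
-- stated objective: alternative
-- what changed: B scans the line once for the positions of ' and ', flattens the nested dict/state loops into one comprehension-built candidate list, and finds the first candidate pair anchored at a recorded position (next/any over the flat list), instead of A's three nested loops each running a fresh full substring search of the line.
import Mathlib
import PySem

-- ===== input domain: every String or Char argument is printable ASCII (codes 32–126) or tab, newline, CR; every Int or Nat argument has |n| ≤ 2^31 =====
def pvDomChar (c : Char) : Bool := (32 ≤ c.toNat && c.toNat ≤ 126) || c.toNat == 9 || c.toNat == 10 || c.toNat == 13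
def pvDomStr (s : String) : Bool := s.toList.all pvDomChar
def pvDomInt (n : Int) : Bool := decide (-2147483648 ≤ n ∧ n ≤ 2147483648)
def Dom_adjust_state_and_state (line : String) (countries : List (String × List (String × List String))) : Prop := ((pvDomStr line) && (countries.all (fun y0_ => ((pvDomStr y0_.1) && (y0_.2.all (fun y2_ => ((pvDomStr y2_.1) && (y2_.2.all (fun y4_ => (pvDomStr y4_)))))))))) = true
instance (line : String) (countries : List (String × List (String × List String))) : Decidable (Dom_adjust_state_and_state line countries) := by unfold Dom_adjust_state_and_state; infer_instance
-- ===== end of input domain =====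

-- B scans the line once for the positions of " and ", flattens the nested loops into one
-- comprehension-built candidate list, and picks the first pair anchored at a recorded
-- position (objective: alternative).

-- ===== PORT A =====
-- info.get('states', []) : first-match lookup in the association list (dict semantics);
-- shared by both ports (both Pythons spell it info.get('states', []))
def pyGetStates (info : List (String × List String)) : List String :=
  match info with
  | [] => []
  | (k, v) :: rest => if k == "states" then v else pyGetStates rest

-- innermost loop: for state2 in states
def aLoop2 (line : String) (s1 : String) : List String → Option String
  | [] => none
  | s2 :: rest =>
    if s1 ≠ s2 then
      if PySem.Str.isIn (s1 ++ " and " ++ s2) line then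
        some (PySem.Str.replace line (s1 ++ " and " ++ s2) (s1 ++ "/" ++ s2))
      else aLoop2 line s1 rest
    else aLoop2 line s1 rest

-- middle loop: for state1 in states
def aLoop1 (line : String) (states : List String) : List String → Option String
  | [] => none
  | s1 :: rest =>
    match aLoop2 line s1 states with
    | some r => some r
    | none => aLoop1 line states rest

-- outer loop: for country, info in countries.items()
def aLoopC (line : String) : List (String × List (String × List String)) → Option String
  | [] => none
  | (_, info) :: rest =>
    match aLoop1 line (pyGetStates info) (pyGetStates info) with
    | some r => some r
    | none => aLoopC line rest

def adjust_state_and_state (line : String) (countries : List (String × List (String × List String))) : List (String × String) :=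
  match aLoopC line countries with
  | some r => [("line", r)]
  | none => [("line", line)]

-- ===== PORT B =====
-- occs = [i for i in range(len(line)) if line[i:i+5] == " and "]
def bOccs (line : String) : List Int :=
  (PySem.List.pyRange 0 (PySem.Str.len line) 1).filter
    (fun i => PySem.Str.slice line (some i) (some (i + 5)) == " and ")

-- pairs = [(s1, s2) for info in countries.values() for s1 in … for s2 in … if s1 != s2]
def bPairs (countries : List (String × List (String × List String))) : List (String × String) :=
  countries.flatMap (fun c =>
    (pyGetStates c.2).flatMap (fun s1 =>
      ((pyGetStates c.2).filter (fun s2 => s1 != s2)).map (fun s2 => (s1, s2))))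

-- any(line[:i].endswith(p[0]) and line[i+5:].startswith(p[1]) for i in occs)
def bAny (line : String) (occs : List Int) (p : String × String) : Bool :=
  occs.any (fun i =>
    PySem.Str.endswith (PySem.Str.slice line none (some i)) p.1 &&
    PySem.Str.startswith (PySem.Str.slice line (some (i + 5)) none) p.2)

-- hit = next((p for p in pairs if any …), None); then build the result dict
def adjust_state_and_state_alt (line : String) (countries : List (String × List (String × List String))) : List (String × String) :=
  let occs := bOccs line
  match (bPairs countries).find? (fun p => bAny line occs p) with
  | none => [("line", line)]
  | some (s1, s2) => [("line", PySem.Str.replace line (s1 ++ " and " ++ s2) (s1 ++ "/" ++ s2))]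

-- ===== PRECONDITION & SPEC =====
def Spec_adjust_state_and_state (line : String) (countries : List (String × List (String × List String))) (out : List (String × String)) : Prop := out = adjust_state_and_state_alt line countries
instance (line : String) (countries : List (String × List (String × List String))) (out : List (String × String)) : Decidable (Spec_adjust_state_and_state line countries out) := by unfold Spec_adjust_state_and_state; infer_instance

-- ===== CLAIM (what is proved, stated in full; the proofs are below) =====
def Claim_equal_adjust_state_and_state : Prop := ∀ (line : String) (countries : List (String × List (String × List String))), Dom_adjust_state_and_state line countries → Spec_adjust_state_and_state line countries (adjust_state_and_state line countries)

-- ===== LEMMAS AND PROOFS =====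

-- the replacement applied to a matched pair
def repl (line : String) (p : String × String) : String :=
  PySem.Str.replace line (p.1 ++ " and " ++ p.2) (p.1 ++ "/" ++ p.2)

-- bridges from the Str-level slices of port B to take/drop on the character list
theorem slice_mid (line : String) (k : Nat) :
    (PySem.Str.slice line (some (k:Int)) (some ((k:Int)+5))).toList = (line.toList.drop k).take 5 := by
  have h5 : ((k:Int)+5) = ((k+5 : Nat) : Int) := by push_cast; ring
  rw [h5,
    show (PySem.Str.slice line (some (k:Int)) (some ((k+5:Nat):Int))).toList
      = PySem.List.slice line.toList (some (k:Int)) (some ((k+5:Nat):Int)) from by simp,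
    PySem.List.slice_natCast]
  congr 1
  omega

theorem slice_pre (line : String) (k : Nat) :
    (PySem.Str.slice line none (some (k:Int))).toList = line.toList.take k := by
  simp [PySem.List.slice_to_natCast]

theorem slice_post (line : String) (k : Nat) :
    (PySem.Str.slice line (some ((k:Int)+5)) none).toList = line.toList.drop (k+5) := by
  have h5 : ((k:Int)+5) = ((k+5 : Nat) : Int) := by push_cast; ring
  rw [h5,
    show (PySem.Str.slice line (some ((k+5:Nat):Int)) none).toList
      = PySem.List.slice line.toList (some ((k+5:Nat):Int)) none from by simp,
    PySem.List.slice_from_natCast]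

theorem str_beq_iff (x y : String) : (x == y) = true ↔ x.toList = y.toList := by
  constructor
  · intro h; simp [beq_iff_eq] at h; exact h ▸ rfl
  · intro h; exact beq_iff_eq.mpr (String.ext (by simpa [String.toList] using h))

theorem cond_iff (line : String) (k : Nat) :
    (PySem.Str.slice line (some (k:Int)) (some ((k:Int)+5)) == " and ") = true ↔
      (line.toList.drop k).take 5 = " and ".toList := by
  rw [str_beq_iff, slice_mid]

theorem ends_iff (line s1 : String) (k : Nat) :
    PySem.Str.endswith (PySem.Str.slice line none (some (k:Int))) s1 = true ↔
      s1.toList <:+ line.toList.take k := by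
  rw [show PySem.Str.endswith (PySem.Str.slice line none (some (k:Int))) s1
      = PySem.Chars.endswith (PySem.Str.slice line none (some (k:Int))).toList s1.toList from by simp,
    slice_pre, PySem.Chars.endswith_iff]

theorem starts_iff (line s2 : String) (k : Nat) :
    PySem.Str.startswith (PySem.Str.slice line (some ((k:Int)+5)) none) s2 = true ↔
      s2.toList <+: line.toList.drop (k+5) := by
  rw [show PySem.Str.startswith (PySem.Str.slice line (some ((k:Int)+5)) none) s2
      = PySem.Chars.startswith (PySem.Str.slice line (some ((k:Int)+5)) none).toList s2.toList from by simp,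
    slice_post, PySem.Chars.startswith_iff]

theorem key_infix_iff (L A B2 : List Char) :
    (A ++ " and ".toList ++ B2) <:+: L ↔
      ∃ k : Nat, k < L.length ∧ (L.drop k).take 5 = " and ".toList ∧
        A <:+ L.take k ∧ B2 <+: L.drop (k + 5) := by
  constructor
  · rintro ⟨u, v, huv⟩
    refine ⟨u.length + A.length, ?_, ?_, ?_, ?_⟩
    · have := congrArg List.length huv
      simp at this; omega
    · have hd : L.drop (u.length + A.length) = " and ".toList ++ (B2 ++ v) := by
        subst huv
        rw [show u ++ (A ++ " and ".toList ++ B2) ++ v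
              = (u ++ A) ++ (" and ".toList ++ (B2 ++ v)) by simp,
            show u.length + A.length = (u ++ A).length by simp,
            List.drop_left]
      rw [hd, show (5:Nat) = (" and ".toList).length from rfl, List.take_left]
    · have ht : L.take (u.length + A.length) = u ++ A := by
        subst huv
        rw [show u ++ (A ++ " and ".toList ++ B2) ++ v
              = (u ++ A) ++ (" and ".toList ++ (B2 ++ v)) by simp,
            show u.length + A.length = (u ++ A).length by simp,
            List.take_left]
      exact ht ▸ ⟨u, rfl⟩
    · have hd : L.drop (u.length + A.length + 5) = B2 ++ v := by
        subst huv
        rw [show u ++ (A ++ " and ".toList ++ B2) ++ v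
              = (u ++ A ++ " and ".toList) ++ (B2 ++ v) by simp,
            show u.length + A.length + 5 = (u ++ A ++ " and ".toList).length by simp; omega,
            List.drop_left]
      exact hd ▸ ⟨v, rfl⟩
  · rintro ⟨k, hk, h5, ⟨u, hu⟩, ⟨t, ht⟩⟩
    refine ⟨u, t, Eq.symm ?_⟩
    have hdk : L.drop k = " and ".toList ++ (B2 ++ t) := by
      rw [← List.take_append_drop 5 (L.drop k), h5, List.drop_drop, ht]
    calc L = L.take k ++ L.drop k := (List.take_append_drop k L).symm
    _ = (u ++ A) ++ (" and ".toList ++ (B2 ++ t)) := by rw [hu, hdk]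
    _ = u ++ (A ++ " and ".toList ++ B2) ++ t := by simp

-- the per-pair tests of A and B agree
theorem test_eq (line s1 s2 : String) :
    PySem.Str.isIn (s1 ++ " and " ++ s2) line = bAny line (bOccs line) (s1, s2) := by
  rw [Bool.eq_iff_iff, PySem.Str.isIn_iff_infix,
    show (s1 ++ " and " ++ s2).toList = s1.toList ++ " and ".toList ++ s2.toList by simp,
    key_infix_iff]
  unfold bAny bOccs
  simp only [List.any_eq_true, List.mem_filter, PySem.List.mem_pyRange_one, Bool.and_eq_true]
  constructor
  · rintro ⟨k, hk, h5, hA, hB⟩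
    refine ⟨(k:Int), ⟨⟨by positivity, ?_⟩, (cond_iff line k).mpr h5⟩,
      (ends_iff line s1 k).mpr hA, (starts_iff line s2 k).mpr hB⟩
    simp only [PySem.Str.len]
    exact_mod_cast hk
  · rintro ⟨i, ⟨⟨h0, hi⟩, hcnd⟩, hend, hstart⟩
    lift i to Nat using h0 with k
    refine ⟨k, ?_, (cond_iff line k).mp hcnd,
      (ends_iff line s1 k).mp hend, (starts_iff line s2 k).mp hstart⟩
    simp only [PySem.Str.len] at hi
    exact_mod_cast hi

-- A's innermost loop computes find? on the filtered/mapped pair block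
theorem loop2_eq (line s1 : String) (l : List String) :
    aLoop2 line s1 l =
      (((l.filter (fun s2 => s1 != s2)).map (fun s2 => (s1, s2))).find?
        (fun p => bAny line (bOccs line) p)).map (repl line) := by
  induction l with
  | nil => rfl
  | cons s2 rest ih =>
    by_cases h : s1 = s2
    · have hne : (s1 != s2) = false := by simp [bne, h]
      rw [show aLoop2 line s1 (s2 :: rest) = aLoop2 line s1 rest from by
            simp [aLoop2, h],
          List.filter_cons, hne]
      simpa using ih
    · have hne : (s1 != s2) = true := by simp [bne, h]
      rw [show aLoop2 line s1 (s2 :: rest)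
            = (if PySem.Str.isIn (s1 ++ " and " ++ s2) line then
                some (PySem.Str.replace line (s1 ++ " and " ++ s2) (s1 ++ "/" ++ s2))
              else aLoop2 line s1 rest) from by simp [aLoop2, h],
          List.filter_cons, hne, if_pos rfl, List.map_cons, test_eq]
      by_cases hb : bAny line (bOccs line) (s1, s2) = true
      · rw [if_pos hb, List.find?_cons_of_pos hb]
        rfl
      · rw [if_neg hb, List.find?_cons_of_neg (by simpa using hb)]
        exact ih

-- A's middle loop computes find? on the flatMap over state1
theorem loop1_eq (line : String) (states l : List String) :
    aLoop1 line states l =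
      ((l.flatMap (fun s1 => ((states.filter (fun s2 => s1 != s2)).map (fun s2 => (s1, s2))))).find?
        (fun p => bAny line (bOccs line) p)).map (repl line) := by
  induction l with
  | nil => rfl
  | cons s1 rest ih =>
    simp only [aLoop1, List.flatMap_cons, List.find?_append, loop2_eq, ih]
    cases hf : ((states.filter (fun s2 => s1 != s2)).map (fun s2 => (s1, s2))).find?
        (fun p => bAny line (bOccs line) p) with
    | none => simp
    | some p => simp

-- A's outer loop computes find? over the whole flat candidate list
theorem loopC_eq (line : String) (cs : List (String × List (String × List String))) :
    aLoopC line cs =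
      ((bPairs cs).find? (fun p => bAny line (bOccs line) p)).map (repl line) := by
  induction cs with
  | nil => rfl
  | cons c rest ih =>
    obtain ⟨_, info⟩ := c
    simp only [aLoopC, bPairs, List.flatMap_cons, List.find?_append, loop1_eq, ih]
    cases hf : ((pyGetStates info).flatMap (fun s1 =>
        (((pyGetStates info).filter (fun s2 => s1 != s2)).map (fun s2 => (s1, s2))))).find?
        (fun p => bAny line (bOccs line) p) with
    | none => simp
    | some p => simp

-- ===== VERDICT (by name: the statement is the Claim_ definition above) =====
theorem adjust_state_and_state_spec : Claim_equal_adjust_state_and_state := by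
  intro line countries _
  unfold Spec_adjust_state_and_state adjust_state_and_state adjust_state_and_state_alt
  rw [loopC_eq]
  cases hf : (bPairs countries).find? (fun p => bAny line (bOccs line) p) with
  | none => simp [hf]
  | some p => obtain ⟨s1, s2⟩ := p; simp [hf, repl]
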